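-- pv_equiv track=rewrite | github.com/wozhendeshuai/nju_pr_project | utils/file_utils/file_function.py | get_changes_files_modified_num
-- ===== SOURCE A (Python) =====
-- def get_changes_files_modified_num(pr_file_dict):
--     """
--         响应后到关闭时间的长度，对于还未close的pr不予计算
--        获取pr中comments/review_comments中第一个非pr提交者评论时间，与pr关闭时间之差
--        pr_dict:
--        {
--         733:  {
--             'guacamole/src/main/java/org/apache/guacamole/rest/usergroup/UserGroupObjectTranslator.java': {
--                 '@@ -57,7 +57,7 @@ public void filterExternalObject(UserContext userContext, APIUserGroup object)\n             throws GuacamoleException {\n \n         // Filter object attributes by defined schema\n-        object.setAttributes(filterAttributes(userContext.getUserAttributes(),\n+        object.setAttributes(filterAttributes(userContext.getUserGroupAttributes(),\n                 object.getAttributes()));\n \n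
--                 }'
--             }
--         }
--        返回的dict为{id：在本PR提交前，本PR涉及到的文件在之前被修改的数量}
--        """
--     re_dict = {}
--     temp_pr_file_dict = {}
--     for key in pr_file_dict.keys():
--         pr_number = key
--         pre_contain_pr_num = 0
--         for file_name_key in pr_file_dict[pr_number].keys():
--             if temp_pr_file_dict.__contains__(file_name_key):
--                 pre_contain_pr_num = pre_contain_pr_num + temp_pr_file_dict[file_name_key]
--                 temp_pr_file_dict[file_name_key] = temp_pr_file_dict[file_name_key] + 1
--             else:
--                 temp_pr_file_dict[file_name_key] = 1
--
--         re_dict[key] = pre_contain_pr_num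
--     return re_dict
-- ===== SOURCE B (Python) =====
-- def get_changes_files_modified_num(pr_file_dict):
--     # Inverted index: for each file, the list of PR keys that modify it, in encounter order.
--     file_to_prs = {}
--     for pr, files in pr_file_dict.items():
--         for file_name in files:
--             file_to_prs.setdefault(file_name, []).append(pr)
--     # Every PR starts at 0, in the original key order.
--     re_dict = {pr: 0 for pr in pr_file_dict}
--     # A file's idx-th modifier had idx prior PRs touching that file.
--     for prs in file_to_prs.values():
--         for idx, pr in enumerate(prs):
--             re_dict[pr] += idx
--     return re_dict
-- ===== Notes on version B (the rewrite author's own statement) =====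
-- stated objective: alternative
-- what changed: B replaces A's sequential running file-counter (one shared temp dict threaded through both loops) by a two-phase data-structure approach: it first builds an inverted index file -> list of PR keys, then credits each PR with the enumerate index of its occurrences in those per-file lists; same O(total files) cost.
import Mathlib
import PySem

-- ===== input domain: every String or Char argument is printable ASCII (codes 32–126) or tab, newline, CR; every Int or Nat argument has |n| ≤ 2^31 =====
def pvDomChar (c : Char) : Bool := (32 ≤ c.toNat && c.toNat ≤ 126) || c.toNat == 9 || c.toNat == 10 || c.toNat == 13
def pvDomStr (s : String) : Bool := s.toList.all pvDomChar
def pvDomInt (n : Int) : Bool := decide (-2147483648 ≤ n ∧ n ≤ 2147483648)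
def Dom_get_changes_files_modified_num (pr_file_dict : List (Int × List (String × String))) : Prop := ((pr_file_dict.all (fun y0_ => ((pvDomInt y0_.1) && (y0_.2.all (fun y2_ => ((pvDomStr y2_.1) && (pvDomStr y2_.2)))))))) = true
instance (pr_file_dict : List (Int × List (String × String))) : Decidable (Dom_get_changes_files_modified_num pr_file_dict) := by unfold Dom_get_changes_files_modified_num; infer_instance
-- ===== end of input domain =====

-- B replaces A's running shared file-counter by an inverted index (file -> PR keys) credited via
-- enumerate indices; a genuinely different decomposition of the same O(total files) computation.


-- ===== PORT A =====
-- literal port of A: one pass, state = (re_dict, temp_pr_file_dict); for each PR, for each file,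
-- add the file's current count to pre_contain_pr_num and bump the count (temp[file] lookup where
-- __contains__ holds is getD _ 0).
def get_changes_files_modified_num (pr_file_dict : List (Int × List (String × String))) : List (Int × Int) :=
  (pr_file_dict.foldl
    (fun (st : PySem.Dict Int Int × PySem.Dict String Int) kv =>
      let inner :=
        kv.2.foldl
          (fun (p : Int × PySem.Dict String Int) f =>
            if p.2.contains f.1 then
              (p.1 + p.2.getD f.1 0, p.2.insert f.1 (p.2.getD f.1 0 + 1))
            else
              (p.1, p.2.insert f.1 1))
          (0, st.2)
      (st.1.insert kv.1 inner.1, inner.2))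
    (PySem.Dict.empty, PySem.Dict.empty)).1.items

-- ===== PORT B =====
-- literal port of B (Source B): build the inverted index file -> PR keys
-- (setdefault(f, []).append(pr) = modify f [] (· ++ [pr])), zero-init re_dict in key order, then
-- re_dict[pr] += idx over each file's enumerated PR list (all keys present, so modify _ 0 is exact).
def get_changes_files_modified_num_alt (pr_file_dict : List (Int × List (String × String))) : List (Int × Int) :=
  let file_to_prs : PySem.Dict String (List Int) :=
    pr_file_dict.foldl
      (fun d kv => kv.2.foldl (fun d f => d.modify f.1 [] (fun l => l ++ [kv.1])) d)
      PySem.Dict.empty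
  let re0 : PySem.Dict Int Int :=
    pr_file_dict.foldl (fun d kv => d.insert kv.1 0) PySem.Dict.empty
  let re : PySem.Dict Int Int :=
    file_to_prs.values.foldl
      (fun d prs =>
        (PySem.List.enumerate prs 0).foldl (fun d ip => d.modify ip.2 0 (fun v => v + ip.1)) d)
      re0
  re.items

-- ===== PRECONDITION & SPEC =====
-- Pre_ excludes association lists with duplicate PR keys: a Python dict argument (the declared
-- parameter type dict[int, dict[str, str]]) can never contain a duplicate key, so such lists do not
-- represent any input A is ever called on.
def Pre_get_changes_files_modified_num (pr_file_dict : List (Int × List (String × String))) : Prop :=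
  (pr_file_dict.map (·.1)).Nodup
instance (pr_file_dict : List (Int × List (String × String))) : Decidable (Pre_get_changes_files_modified_num pr_file_dict) := by unfold Pre_get_changes_files_modified_num; infer_instance

def pvWitness_get_changes_files_modified_num : (List (Int × List (String × String))) :=
  [(1, [("a", "d1"), ("b", "d2")]), (2, [("a", "d3")])]

def Spec_get_changes_files_modified_num (pr_file_dict : List (Int × List (String × String))) (out : List (Int × Int)) : Prop := out = get_changes_files_modified_num_alt pr_file_dict
instance (pr_file_dict : List (Int × List (String × String))) (out : List (Int × Int)) : Decidable (Spec_get_changes_files_modified_num pr_file_dict out) := by unfold Spec_get_changes_files_modified_num; infer_instance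

-- ===== CLAIM (what is proved, stated in full; the proofs are below) =====
def Claim_equal_get_changes_files_modified_num : Prop := ∀ (pr_file_dict : List (Int × List (String × String))), Dom_get_changes_files_modified_num pr_file_dict → Pre_get_changes_files_modified_num pr_file_dict → Spec_get_changes_files_modified_num pr_file_dict (get_changes_files_modified_num pr_file_dict)

-- ===== LEMMAS AND PROOFS =====

-- the flattened (file, pr) occurrence sequence, in program order
def pvFlat (prs : List (Int × List (String × String))) : List (String × Int) :=
  prs.flatMap (fun kv => kv.2.map (fun f => (f.1, kv.1)))

-- reference value: for each occurrence tagged pr, count earlier occurrences of the same file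
def pvWsum : List String → List (String × Int) → Int → Int
  | _, [], _ => 0
  | seen, e :: rest, pr =>
      (if e.2 = pr then (seen.count e.1 : Int) else 0) + pvWsum (seen ++ [e.1]) rest pr

def pvSpec (prs : List (Int × List (String × String))) : List (Int × Int) :=
  (prs.map (·.1)).map (fun k => (k, pvWsum [] (pvFlat prs) k))

theorem pvFlat_append (xs ys : List (Int × List (String × String))) :
    pvFlat (xs ++ ys) = pvFlat xs ++ pvFlat ys := by
  simp [pvFlat]

theorem pvWsum_append (S T : List (String × Int)) (seen : List String) (pr : Int) :
    pvWsum seen (S ++ T) pr = pvWsum seen S pr + pvWsum (seen ++ S.map (·.1)) T pr := by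
  induction S generalizing seen with
  | nil => simp [pvWsum]
  | cons e rest ih => simp [pvWsum, ih (seen ++ [e.1]), add_assoc]

theorem pvWsum_zero (S : List (String × Int)) (seen : List String) (pr : Int)
    (h : ∀ p ∈ S, p.2 ≠ pr) : pvWsum seen S pr = 0 := by
  induction S generalizing seen with
  | nil => rfl
  | cons e rest ih =>
      have he : e.2 ≠ pr := h e (by simp)
      simp [pvWsum, he, ih (seen ++ [e.1]) (fun p hp => h p (by simp [hp]))]

theorem mem_pvFlat_tags (prs : List (Int × List (String × String))) (p : String × Int)
    (hp : p ∈ pvFlat prs) : p.2 ∈ prs.map (·.1) := by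
  simp only [pvFlat, List.mem_flatMap, List.mem_map] at hp
  obtain ⟨kv, hkv, f, _, rfl⟩ := hp
  exact List.mem_map.mpr ⟨kv, hkv, rfl⟩

-- ---- A side ----

def pvStepF : (Int × PySem.Dict String Int) → (String × String) → (Int × PySem.Dict String Int) :=
  fun p f =>
    if p.2.contains f.1 then
      (p.1 + p.2.getD f.1 0, p.2.insert f.1 (p.2.getD f.1 0 + 1))
    else
      (p.1, p.2.insert f.1 1)

def pvStepA :
    (PySem.Dict Int Int × PySem.Dict String Int) → (Int × List (String × String)) →
      (PySem.Dict Int Int × PySem.Dict String Int) :=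
  fun st kv =>
    ((st.1.insert kv.1 (kv.2.foldl pvStepF (0, st.2)).1), (kv.2.foldl pvStepF (0, st.2)).2)

theorem portA_eq (prs : List (Int × List (String × String))) :
    get_changes_files_modified_num prs =
      (prs.foldl pvStepA (PySem.Dict.empty, PySem.Dict.empty)).1.items := rfl

-- the temp accumulator is a pure insert-add-one counter fold
theorem tempF (fs : List (String × String)) (c : Int) (t : PySem.Dict String Int) :
    (fs.foldl pvStepF (c, t)).2 =
      (fs.map (·.1)).foldl (fun d x => d.insert x (d.getD x 0 + 1)) t := by
  induction fs generalizing c t with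
  | nil => rfl
  | cons f rest ih =>
      cases h : t.contains f.1 with
      | true => simp [pvStepF, h, ih]
      | false => simp [pvStepF, h, ih, PySem.Dict.getD_of_not_contains t 0 h]

def pvInnerSum : PySem.Dict String Int → List String → Int
  | _, [] => 0
  | t, x :: xs => t.getD x 0 + pvInnerSum (t.insert x (t.getD x 0 + 1)) xs

theorem cntF (fs : List (String × String)) (c : Int) (t : PySem.Dict String Int) :
    (fs.foldl pvStepF (c, t)).1 = c + pvInnerSum t (fs.map (·.1)) := by
  induction fs generalizing c t with
  | nil => simp [pvInnerSum]
  | cons f rest ih =>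
      cases h : t.contains f.1 with
      | true => simp [pvStepF, h, ih, pvInnerSum, add_assoc]
      | false =>
          simp [pvStepF, h, ih, pvInnerSum, PySem.Dict.getD_of_not_contains t 0 h]

theorem pvInnerSum_eq_wsum (xs : List String) (t : PySem.Dict String Int) (seen : List String)
    (k : Int) (h : ∀ f, t.getD f 0 = (seen.count f : Int)) :
    pvInnerSum t xs = pvWsum seen (xs.map (fun x => (x, k))) k := by
  induction xs generalizing t seen with
  | nil => rfl
  | cons x rest ih =>
      have hnext : ∀ f, (t.insert x (t.getD x 0 + 1)).getD f 0 = (((seen ++ [x]).count f : Nat) : Int) := by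
        intro f
        rw [PySem.Dict.getD_insert]
        by_cases hf : f = x
        · subst hf; simp [h f, List.count_append]
        · simp [hf, h f, List.count_append, Ne.symm hf]
      simp only [pvInnerSum, List.map_cons, pvWsum]
      rw [ih _ _ hnext, h x]
      simp

theorem A_aux (prs : List (Int × List (String × String)))
    (hnd : (prs.map (·.1)).Nodup) :
    (prs.foldl pvStepA (PySem.Dict.empty, PySem.Dict.empty)).1.items = pvSpec prs ∧
    (prs.foldl pvStepA (PySem.Dict.empty, PySem.Dict.empty)).2 =
      ((pvFlat prs).map (·.1)).foldl (fun d x => d.insert x (d.getD x 0 + 1)) PySem.Dict.empty := by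
  induction prs using List.reverseRecOn with
  | nil => exact ⟨rfl, rfl⟩
  | append_singleton xs kv ih =>
      have hmap : (xs ++ [kv]).map (·.1) = xs.map (·.1) ++ [kv.1] := by simp
      rw [hmap] at hnd
      have hnd' : (xs.map (·.1)).Nodup := (List.nodup_append.mp hnd).1
      have hout : kv.1 ∉ xs.map (·.1) := by
        intro hmem
        have hdisj := (List.nodup_append.mp hnd).2.2
        exact hdisj _ hmem _ (by simp) rfl
      obtain ⟨ihre, ihtemp⟩ := ih hnd'
      rw [List.foldl_append]
      set st := xs.foldl pvStepA (PySem.Dict.empty, PySem.Dict.empty) with hst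
      have hkeys : st.1.keys = xs.map (·.1) := by
        show st.1.items.map (·.1) = _
        rw [ihre]; simp [pvSpec]
      have hseg : pvFlat (xs ++ [kv]) = pvFlat xs ++ kv.2.map (fun f => (f.1, kv.1)) := by
        rw [pvFlat_append]; simp [pvFlat]
      have hcnt : ∀ f, st.2.getD f 0 = (((pvFlat xs).map (·.1)).count f : Int) := by
        intro f
        rw [ihtemp, PySem.Dict.getD_foldl_insert_add_one, PySem.Dict.getD_empty]
        simp
      constructor
      · -- items
        have hnc : st.1.contains kv.1 = false := by
          rw [PySem.Dict.contains_eq_decide_mem_keys, hkeys]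
          simp [hout]
        simp only [List.foldl_cons, List.foldl_nil, pvStepA]
        rw [PySem.Dict.items_insert_of_not_contains _ _ hnc, ihre]
        have hval : (kv.2.foldl pvStepF (0, st.2)).1 = pvWsum [] (pvFlat (xs ++ [kv])) kv.1 := by
          rw [cntF]
          rw [pvInnerSum_eq_wsum (kv.2.map (·.1)) st.2 ((pvFlat xs).map (·.1)) kv.1 hcnt]
          rw [hseg, pvWsum_append]
          have h0 : pvWsum [] (pvFlat xs) kv.1 = 0 := by
            apply pvWsum_zero
            intro p hp hpk
            exact hout (hpk ▸ mem_pvFlat_tags xs p hp)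
          rw [h0, zero_add, List.nil_append, List.map_map]
          simp only [zero_add]
          rfl
        have hold : pvSpec (xs ++ [kv]) = pvSpec xs ++ [(kv.1, pvWsum [] (pvFlat (xs ++ [kv])) kv.1)] := by
          simp only [pvSpec, hmap, List.map_append, List.map_cons, List.map_nil]
          congr 1
          apply List.map_congr_left
          intro k hk
          have hkk : k ≠ kv.1 := fun h => hout (h ▸ hk)
          congr 1
          rw [hseg, pvWsum_append]
          have h0 : pvWsum ([] ++ (pvFlat xs).map (·.1)) (kv.2.map (fun f => (f.1, kv.1))) k = 0 := by
            apply pvWsum_zero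
            intro p hp
            simp only [List.mem_map] at hp
            obtain ⟨f, _, rfl⟩ := hp
            exact Ne.symm hkk
          rw [h0, add_zero]
        rw [hold, hval]
      · -- temp
        simp only [List.foldl_cons, List.foldl_nil, pvStepA]
        rw [tempF, ihtemp, hseg]
        rw [List.map_append, List.foldl_append, List.map_map]
        rfl

theorem A_eq_spec (prs : List (Int × List (String × String)))
    (hnd : (prs.map (·.1)).Nodup) : get_changes_files_modified_num prs = pvSpec prs := by
  rw [portA_eq]; exact (A_aux prs hnd).1

-- ---- B side ----

def pvModStep : PySem.Dict String (List Int) → (String × Int) → PySem.Dict String (List Int) :=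
  fun d e => d.modify e.1 [] (fun l => l ++ [e.2])

theorem ftp_flatten (prs : List (Int × List (String × String))) (d : PySem.Dict String (List Int)) :
    prs.foldl (fun d kv => kv.2.foldl (fun d f => d.modify f.1 [] (fun l => l ++ [kv.1])) d) d =
      (pvFlat prs).foldl pvModStep d := by
  induction prs generalizing d with
  | nil => rfl
  | cons kv rest ih =>
      simp only [List.foldl_cons, pvFlat, List.flatMap_cons, List.foldl_append]
      rw [← pvFlat, ih, List.foldl_map]
      rfl

-- one list of (idx, pr) pairs folded with re[pr] += idx
theorem modadd (pairs : List (Int × Int)) (d : PySem.Dict Int Int) (v : Int) :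
    (pairs.foldl (fun d ip => d.modify ip.2 0 (fun x => x + ip.1)) d).getD v 0 =
      d.getD v 0 + ((pairs.filter (fun ip => ip.2 == v)).map (·.1)).sum := by
  induction pairs generalizing d with
  | nil => simp
  | cons ip rest ih =>
      simp only [List.foldl_cons, List.filter_cons]
      rw [ih, PySem.Dict.getD_modify]
      by_cases h : v = ip.2
      · subst h
        simp
        ring
      · have hb : (ip.2 == v) = false := by simp [Ne.symm h]
        simp [h, hb]

def pvEsum (l : List Int) (pr : Int) : Int :=
  (((PySem.List.enumerate l 0).filter (fun ip => ip.2 == pr)).map (·.1)).sum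

theorem looplists (LS : List (List Int)) (d : PySem.Dict Int Int) (v : Int) :
    (LS.foldl
        (fun d lst =>
          (PySem.List.enumerate lst 0).foldl (fun d ip => d.modify ip.2 0 (fun x => x + ip.1)) d)
        d).getD v 0 =
      d.getD v 0 + (LS.map (fun lst => pvEsum lst v)).sum := by
  induction LS generalizing d with
  | nil => simp
  | cons lst rest ih =>
      simp only [List.foldl_cons, List.map_cons, List.sum_cons]
      rw [ih, modadd]
      unfold pvEsum
      ring

theorem re0_getD (prs : List (Int × List (String × String))) (d : PySem.Dict Int Int)
    (h : ∀ v, d.getD v 0 = 0) (v : Int) :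
    (prs.foldl (fun d kv => d.insert kv.1 0) d).getD v 0 = 0 := by
  induction prs generalizing d with
  | nil => exact h v
  | cons kv rest ih =>
      simp only [List.foldl_cons]
      apply ih
      intro w
      rw [PySem.Dict.getD_insert]
      split <;> simp [h]

theorem keys_modify_of_contains (d : PySem.Dict Int Int) (k : Int) (d0 : Int) (f : Int → Int)
    (h : d.contains k = true) : (d.modify k d0 f).keys = d.keys := by
  rw [PySem.Dict.keys_modify, PySem.Dict.keys_insert_of_contains d _ h]

theorem inner_keys (pairs : List (Int × Int)) (d : PySem.Dict Int Int)
    (h : ∀ ip ∈ pairs, ip.2 ∈ d.keys) :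
    (pairs.foldl (fun d ip => d.modify ip.2 0 (fun x => x + ip.1)) d).keys = d.keys := by
  induction pairs generalizing d with
  | nil => rfl
  | cons ip rest ih =>
      simp only [List.foldl_cons]
      have hc : d.contains ip.2 = true := by
        rw [PySem.Dict.contains_eq_decide_mem_keys]
        simp [h ip (by simp)]
      have hk := keys_modify_of_contains d ip.2 0 (fun x => x + ip.1) hc
      rw [ih _ (fun q hq => by rw [hk]; exact h q (by simp [hq])), hk]

theorem loop_keys (LS : List (List Int)) (d : PySem.Dict Int Int)
    (h : ∀ lst ∈ LS, ∀ x ∈ lst, x ∈ d.keys) :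
    (LS.foldl
        (fun d lst =>
          (PySem.List.enumerate lst 0).foldl (fun d ip => d.modify ip.2 0 (fun x => x + ip.1)) d)
        d).keys = d.keys := by
  induction LS generalizing d with
  | nil => rfl
  | cons lst rest ih =>
      simp only [List.foldl_cons]
      have hk : ((PySem.List.enumerate lst 0).foldl
          (fun d ip => d.modify ip.2 0 (fun x => x + ip.1)) d).keys = d.keys := by
        apply inner_keys
        intro ip hip
        have : ip.2 ∈ lst := by
          have := (PySem.List.mem_enumerate_iff _ _ _).mp hip
          obtain ⟨k, hkl, rfl⟩ := this
          simp
        exact h lst (by simp) ip.2 this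
      rw [ih _ (fun l hl x hx => by rw [hk]; exact h l (by simp [hl]) x hx), hk]

theorem pvEsum_append_singleton (l : List Int) (x pr : Int) :
    pvEsum (l ++ [x]) pr = pvEsum l pr + (if x = pr then (l.length : Int) else 0) := by
  unfold pvEsum
  rw [PySem.List.enumerate_append]
  simp only [List.filter_append, List.map_append, List.sum_append]
  congr 1
  by_cases h : x = pr
  · simp [PySem.List.enumerate, h]
  · have : (x == pr) = false := by simp [h]
    simp [PySem.List.enumerate, this, h]

-- pointwise update of a sum over a Nodup key list
theorem sum_map_update (l : List String) (F G : String → Int) (c₀ : String) (δ : Int)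
    (hnd : l.Nodup) (hmem : c₀ ∈ l) (hne : ∀ c ∈ l, c ≠ c₀ → G c = F c)
    (hc : G c₀ = F c₀ + δ) : (l.map G).sum = (l.map F).sum + δ := by
  induction l with
  | nil => simp at hmem
  | cons a rest ih =>
      rcases List.mem_cons.mp hmem with h | h
      · subst h
        have : ∀ c ∈ rest, G c = F c := by
          intro c hcr
          exact hne c (by simp [hcr]) (fun hcc => (List.nodup_cons.mp hnd).1 (hcc ▸ hcr))
        simp only [List.map_cons, List.sum_cons, hc, List.map_congr_left this]
        ring
      · have ha : a ≠ c₀ := fun hac => (List.nodup_cons.mp hnd).1 (hac ▸ h)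
        have := ih (List.nodup_cons.mp hnd).2 h (fun c hcr => hne c (by simp [hcr]))
        simp only [List.map_cons, List.sum_cons, this, hne a (by simp) ha]
        ring

theorem count_filter_len (S : List (String × Int)) (c : String) :
    ((S.filter (fun p => p.1 == c)).length : Int) = ((S.map (·.1)).count c : Int) := by
  congr 1
  rw [List.count_eq_countP, List.countP_map]
  exact Eq.symm List.countP_eq_length_filter

theorem group_sum (S : List (String × Int)) (pr : Int) :
    ((PySem.Set.ofList (S.map (·.1))).map
        (fun c => pvEsum ((S.filter (fun p => p.1 == c)).map (·.2)) pr)).sum =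
      pvWsum [] S pr := by
  induction S using List.reverseRecOn with
  | nil => simp [pvWsum, PySem.Set.ofList]
  | append_singleton S e ih =>
      have hwr : pvWsum [] (S ++ [e]) pr =
          pvWsum [] S pr + (if e.2 = pr then ((S.map (·.1)).count e.1 : Int) else 0) := by
        rw [pvWsum_append]
        simp [pvWsum]
      have hmapfst : (S ++ [e]).map (·.1) = S.map (·.1) ++ [e.1] := by simp
      have hfilter : ∀ c, (S ++ [e]).filter (fun p => p.1 == c) =
          S.filter (fun p => p.1 == c) ++ (if e.1 = c then [e] else []) := by
        intro c
        rw [List.filter_append]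
        congr 1
        by_cases h : e.1 = c
        · simp [List.filter, h]
        · have hb : (e.1 == c) = false := by simp [h]
          simp [List.filter, hb]
          exact h
      set F := fun c => pvEsum ((S.filter (fun p => p.1 == c)).map (·.2)) pr with hF
      set G := fun c => pvEsum (((S ++ [e]).filter (fun p => p.1 == c)).map (·.2)) pr with hG
      have hGne : ∀ c, c ≠ e.1 → G c = F c := by
        intro c hc
        simp only [hG, hF, hfilter c, if_neg (Ne.symm hc), List.append_nil]
      have hGe : G e.1 = F e.1 + (if e.2 = pr then ((S.map (·.1)).count e.1 : Int) else 0) := by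
        have h1 : (S ++ [e]).filter (fun p => p.1 == e.1) = S.filter (fun p => p.1 == e.1) ++ [e] := by
          rw [hfilter e.1]
          simp
        simp only [hG, hF, h1, List.map_append, List.map_cons, List.map_nil]
        rw [pvEsum_append_singleton]
        congr 1
        by_cases h : e.2 = pr
        · simp only [if_pos h]
          rw [List.length_map]
          exact count_filter_len S e.1
        · simp [h]
      rw [hmapfst, PySem.Set.ofList_append_singleton, hwr, ← ih]
      by_cases hm : e.1 ∈ PySem.Set.ofList (S.map (·.1))
      · rw [PySem.Set.add_of_mem hm]
        exact sum_map_update _ F G e.1 _ (PySem.Set.nodup_ofList _) hm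
          (fun c _ hc => hGne c hc) hGe
      · rw [PySem.Set.add_of_not_mem hm]
        have hnotmem : e.1 ∉ S.map (·.1) := fun h => hm ((PySem.Set.mem_ofList _ _).mpr h)
        have hcount : (S.map (·.1)).count e.1 = 0 := List.count_eq_zero.mpr hnotmem
        have hfe : S.filter (fun p => p.1 == e.1) = [] := by
          apply List.filter_eq_nil_iff.mpr
          intro p hp hpe
          exact hnotmem (List.mem_map.mpr ⟨p, hp, by simpa using hpe⟩)
        have hGe0 : G e.1 = 0 := by
          rw [hGe, hF]
          simp [hfe, pvEsum, hcount]
        rw [List.map_append, List.sum_append, List.map_cons, List.map_nil, List.sum_cons,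
          List.sum_nil]
        rw [List.map_congr_left (fun c hc => hGne c (fun h => hm (h ▸ hc)))]
        rw [hGe0, hcount]
        simp
      

theorem B_eq_spec (prs : List (Int × List (String × String)))
    (hnd : (prs.map (·.1)).Nodup) : get_changes_files_modified_num_alt prs = pvSpec prs := by
  have hdef : get_changes_files_modified_num_alt prs =
      ((prs.foldl
            (fun d kv => kv.2.foldl (fun d f => d.modify f.1 [] (fun l => l ++ [kv.1])) d)
            PySem.Dict.empty).values.foldl
          (fun d lst =>
            (PySem.List.enumerate lst 0).foldl (fun d ip => d.modify ip.2 0 (fun x => x + ip.1)) d)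
          (prs.foldl (fun d kv => d.insert kv.1 0) (PySem.Dict.empty : PySem.Dict Int Int))).items := rfl
  rw [hdef, ftp_flatten]
  set S := pvFlat prs with hS
  set ftp := S.foldl pvModStep PySem.Dict.empty with hftp
  have hkeysftp : ftp.keys = PySem.Set.ofList (S.map (·.1)) := by
    rw [hftp]
    rw [show pvModStep = fun d (p : String × Int) => d.modify p.1 [] fun x => x ++ [p.2] from rfl]
    rw [PySem.Dict.keys_foldl_modify_key S (·.1) [] (fun _ e => fun l => l ++ [e.2])
      PySem.Dict.empty]
    rw [PySem.Dict.keys_empty, PySem.Set.update_nil_left]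
  have hndftp : ftp.keys.Nodup := by rw [hkeysftp]; exact PySem.Set.nodup_ofList _
  have hgetDftp : ∀ c, ftp.getD c [] = ((S.filter (fun p => p.1 == c)).map (·.2)) := by
    intro c
    rw [hftp]
    rw [show pvModStep = fun d (p : String × Int) => d.modify p.1 [] fun x => x ++ [p.2] from rfl]
    rw [PySem.Dict.getD_foldl_modify_append, PySem.Dict.getD_empty]
    simp
  have hvals : ftp.values = ftp.keys.map (fun c => ftp.getD c []) :=
    PySem.Dict.values_eq_map_keys ftp hndftp []
  set re0 := prs.foldl (fun d kv => d.insert kv.1 0) (PySem.Dict.empty : PySem.Dict Int Int)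
    with hre0
  have hre0keys : re0.keys = prs.map (·.1) := by
    rw [hre0]
    rw [PySem.Dict.keys_foldl_insert_key prs (·.1) (fun _ _ => 0) PySem.Dict.empty]
    rw [PySem.Dict.keys_empty, PySem.Set.update_nil_left]
    exact PySem.Set.ofList_eq_self_of_nodup _ hnd
  have hre0getD : ∀ v, re0.getD v 0 = 0 := by
    intro v
    rw [hre0]
    exact re0_getD prs PySem.Dict.empty (fun w => PySem.Dict.getD_empty w 0) v
  set re := ftp.values.foldl
      (fun d lst =>
        (PySem.List.enumerate lst 0).foldl (fun d ip => d.modify ip.2 0 (fun x => x + ip.1)) d)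
      re0 with hre
  have hrekeys : re.keys = prs.map (·.1) := by
    rw [hre, loop_keys, hre0keys]
    intro lst hlst x hx
    rw [hre0keys]
    rw [hvals] at hlst
    obtain ⟨c, _, rfl⟩ := List.mem_map.mp hlst
    rw [hgetDftp c] at hx
    obtain ⟨p, hp, rfl⟩ := List.mem_map.mp hx
    exact mem_pvFlat_tags prs p (List.mem_of_mem_filter hp)
  have hregetD : ∀ v, re.getD v 0 = pvWsum [] S v := by
    intro v
    rw [hre, looplists, hre0getD, zero_add, hvals, hkeysftp, List.map_map]
    rw [← group_sum S v]
    apply congrArg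
    apply List.map_congr_left
    intro c _
    simp [Function.comp, hgetDftp c, pvEsum]
  have hrend : re.keys.Nodup := by rw [hrekeys]; exact hnd
  rw [PySem.Dict.items_eq_map_keys re hrend 0, hrekeys]
  unfold pvSpec
  apply List.map_congr_left
  intro k _
  rw [hregetD k, hS]

-- ===== VERDICT (by name: the statement is the Claim_ definition above) =====
theorem get_changes_files_modified_num_spec : Claim_equal_get_changes_files_modified_num := by
  intro prs _ hpre
  unfold Spec_get_changes_files_modified_num
  rw [A_eq_spec prs hpre, B_eq_spec prs hpre]
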